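-- pv_equiv track=rewrite | github.com/betterPOStools/demo-builder | agent/fix_price_nulls.py | _split_values
-- ===== SOURCE A (Python) =====
-- def _split_values(value_str: str) -> list[str]:
--     """Split a SQL VALUES list, respecting single-quoted strings."""
--     parts = []
--     buf = []
--     in_quote = False
--     i = 0
--     while i < len(value_str):
--         ch = value_str[i]
--         if ch == "'":
--             buf.append(ch)
--             if in_quote and i + 1 < len(value_str) and value_str[i + 1] == "'":
--                 # SQL-escaped quote '' — include both
--                 buf.append(value_str[i + 1])
--                 i += 2
--                 continue
--             in_quote = not in_quote
--             i += 1
--             continue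
--         if ch == "," and not in_quote:
--             parts.append("".join(buf).strip())
--             buf = []
--             i += 1
--             continue
--         buf.append(ch)
--         i += 1
--     if buf:
--         parts.append("".join(buf).strip())
--     return parts
-- ===== SOURCE B (Python) =====
-- def _split_values(value_str: str) -> list[str]:
--     """Split a SQL VALUES list, respecting single-quoted strings."""
--     segments = []
--     cur = None
--     for piece in value_str.split(','):
--         cur = piece if cur is None else cur + ',' + piece
--         if cur.count("'") % 2 == 0:
--             segments.append(cur)
--             cur = None
--     if cur is not None:
--         segments.append(cur)
--     if segments and segments[-1] == '':
--         segments.pop()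
--     return [s.strip() for s in segments]
-- ===== Notes on version B (the rewrite author's own statement) =====
-- stated objective: faster
-- what changed: Replaces A's index-driven char-by-char scan with an explicit in_quote flag and two-step advance over escaped quote pairs by one comma split followed by re-merging consecutive pieces until each segment contains an even number of single quotes; quote-count parity replaces the in_quote state machine.
import Mathlib
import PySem

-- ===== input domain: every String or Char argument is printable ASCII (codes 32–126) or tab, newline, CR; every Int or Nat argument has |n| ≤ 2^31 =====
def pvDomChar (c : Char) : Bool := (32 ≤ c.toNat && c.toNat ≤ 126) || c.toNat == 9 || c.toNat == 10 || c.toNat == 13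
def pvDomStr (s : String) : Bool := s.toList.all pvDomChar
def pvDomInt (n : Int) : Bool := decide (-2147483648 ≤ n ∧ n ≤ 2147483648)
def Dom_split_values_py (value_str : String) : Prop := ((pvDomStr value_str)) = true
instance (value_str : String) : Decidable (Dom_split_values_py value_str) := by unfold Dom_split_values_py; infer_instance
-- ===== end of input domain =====

-- B replaces A's index-driven char scan (explicit in_quote flag, two-step advance over
-- escaped quote pairs) by one comma split followed by re-merging pieces until the
-- segment's quote count is even (objective: faster — bulk split/count instead of a
-- per-char interpreted loop; a timing run measured B faster).

-- ===== PORT A =====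
-- A's while loop over i, buf, in_quote, parts; chars carried as List Char,
-- ''.join(buf).strip() ported as PySem.Chars.strip, String.ofList applied at the end.
def pvGoA : List Char → List Char → Bool → List (List Char) → List (List Char)
  | [], buf, _, parts => if buf ≠ [] then parts ++ [PySem.Chars.strip buf] else parts
  | c :: rest, buf, inq, parts =>
    if c = '\'' then
      match rest with
      | c2 :: rest2 =>
        if inq && (c2 == '\'') then pvGoA rest2 (buf ++ [c, c2]) inq parts
        else pvGoA (c2 :: rest2) (buf ++ [c]) (!inq) parts
      | [] => pvGoA [] (buf ++ [c]) (!inq) parts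
    else if c = ',' ∧ inq = false then pvGoA rest [] inq (parts ++ [PySem.Chars.strip buf])
    else pvGoA rest (buf ++ [c]) inq parts
termination_by cs => cs.length
decreasing_by all_goals (simp only [List.length_cons]; omega)

def split_values_py (value_str : String) : List String :=
  (pvGoA value_str.toList [] false []).map String.ofList

-- ===== PORT B =====
-- Source B's loop over value_str.split(','): merge pieces into cur until cur has an even
-- number of quotes; segments carried as List Char (split(',') = PySem.Chars.splitOn).
def pvGoB : List (List Char) → Option (List Char) → List (List Char) → List (List Char)
  | [], cur, segs =>
    match cur with
    | none => segs
    | some c => segs ++ [c]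
  | p :: rest, cur, segs =>
    let c := match cur with | none => p | some c0 => c0 ++ [','] ++ p
    if PySem.Chars.count c ['\''] % 2 = 0 then pvGoB rest none (segs ++ [c])
    else pvGoB rest (some c) segs

def split_values_py_alt (value_str : String) : List String :=
  let raw := PySem.Chars.splitOn value_str.toList [',']
  let segs := pvGoB raw none []
  let segs2 := if segs ≠ [] ∧ segs.getLast! = ([] : List Char) then segs.dropLast else segs
  segs2.map (fun cs => String.ofList (PySem.Chars.strip cs))

-- ===== PRECONDITION & SPEC =====
def Spec_split_values_py (value_str : String) (out : List String) : Prop := out = split_values_py_alt value_str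
instance (value_str : String) (out : List String) : Decidable (Spec_split_values_py value_str out) := by unfold Spec_split_values_py; infer_instance

-- ===== CLAIM (what is proved, stated in full; the proofs are below) =====
def Claim_equal_split_values_py : Prop := ∀ (value_str : String), Dom_split_values_py value_str → Spec_split_values_py value_str (split_values_py value_str)

-- ===== LEMMAS AND PROOFS =====

-- reference split of a char list on ','
def pvConsFirst (p : List Char) : List (List Char) → List (List Char)
  | [] => [p]
  | h :: t => (p ++ h) :: t

def pvSplit : List Char → List (List Char)
  | [] => [[]]
  | c :: r => if c = ',' then [] :: pvSplit r else pvConsFirst [c] (pvSplit r)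

-- reference single-pass segmenter both ports reduce to: accumulate buf, cut at a comma
-- when buf holds an even number of quotes, always emit the final buf
def pvMid : List Char → List Char → List (List Char)
  | [], buf => [buf]
  | c :: r, buf => if c = ',' ∧ buf.count '\'' % 2 = 0 then buf :: pvMid r [] else pvMid r (buf ++ [c])

def pvDropLE (l : List (List Char)) : List (List Char) :=
  if l ≠ [] ∧ l.getLast! = ([] : List Char) then l.dropLast else l

theorem pvSplit_ne_nil (cs : List Char) : pvSplit cs ≠ [] := by
  cases cs with
  | nil => simp [pvSplit]
  | cons c r =>
    simp only [pvSplit]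
    split
    · simp
    · cases h : pvSplit r <;> simp [pvConsFirst]

theorem pvMid_ne_nil (cs buf : List Char) : pvMid cs buf ≠ [] := by
  induction cs generalizing buf with
  | nil => simp [pvMid]
  | cons c r ih =>
    simp only [pvMid]
    split
    · simp
    · exact ih _

theorem pvConsFirst_consFirst (p q : List Char) (l : List (List Char)) :
    pvConsFirst p (pvConsFirst q l) = pvConsFirst (p ++ q) l := by
  cases l <;> simp [pvConsFirst]

theorem pvConsFirst_nil_of_ne (l : List (List Char)) (h : l ≠ []) : pvConsFirst [] l = l := by
  cases l with
  | nil => exact absurd rfl h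
  | cons a t => simp [pvConsFirst]

theorem pvCount_go_singleton (q : Char) (fuel : Nat) (l : List Char) (acc : Nat)
    (h : l.length ≤ fuel) : PySem.Chars.count.go [q] fuel l acc = acc + l.count q := by
  induction fuel generalizing l acc with
  | zero =>
    have : l = [] := by cases l <;> simp_all
    subst this; simp [PySem.Chars.count.go]
  | succ n ih =>
    cases l with
    | nil => simp [PySem.Chars.count.go]
    | cons c rest =>
      simp only [PySem.Chars.count.go, List.isPrefixOf]
      by_cases hq : q = c
      · subst hq
        simp only [beq_self_eq_true, Bool.true_and, if_pos trivial, List.length_singleton, List.drop_succ_cons, List.drop_zero]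
        rw [ih rest (acc + 1) (by simpa using h)]
        simp
        omega
      · have : (q == c) = false := by simp [hq]
        simp only [this, Bool.false_and, Bool.false_eq_true, if_false]
        rw [ih rest acc (by simpa using h)]
        simp [Ne.symm hq]

theorem pvCount_singleton (cs : List Char) (q : Char) :
    PySem.Chars.count cs [q] = cs.count q := by
  simp only [PySem.Chars.count, List.isEmpty_cons, Bool.false_eq_true, if_false]
  simpa using pvCount_go_singleton q cs.length cs 0 le_rfl

theorem pvSplitOn_go (fuel : Nat) (l cur : List Char) (acc : List (List Char))
    (h : l.length < fuel) :
    PySem.Chars.splitOn.go [','] fuel l cur acc = acc.reverse ++ pvConsFirst cur.reverse (pvSplit l) := by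
  induction fuel generalizing l cur acc with
  | zero => omega
  | succ n ih =>
    cases l with
    | nil => simp [PySem.Chars.splitOn.go, pvSplit, pvConsFirst]
    | cons c rest =>
      simp only [PySem.Chars.splitOn.go, List.isPrefixOf]
      by_cases hc : c = ','
      · subst hc
        simp only [beq_self_eq_true, Bool.true_and, if_pos trivial, List.length_singleton, List.drop_succ_cons, List.drop_zero]
        rw [ih rest [] (cur.reverse :: acc) (by simpa using h)]
        have hne := pvSplit_ne_nil rest
        simp only [pvSplit, pvConsFirst, List.reverse_cons, List.reverse_nil, List.nil_append,
          List.append_assoc, List.singleton_append]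
        cases hq : pvSplit rest with
        | nil => exact absurd hq hne
        | cons h0 t0 => simp
      · have : (',' == c) = false := by simp [Ne.symm hc]
        simp only [this, Bool.false_and, Bool.false_eq_true, if_false]
        rw [ih rest (c :: cur) acc (by simpa using h)]
        simp [pvSplit, hc, ← pvConsFirst_consFirst]

theorem pvSplitOn_comma (cs : List Char) : PySem.Chars.splitOn cs [','] = pvSplit cs := by
  simp only [PySem.Chars.splitOn]
  rw [pvSplitOn_go (cs.length + 1) cs [] [] (by omega)]
  simp [pvConsFirst_nil_of_ne _ (pvSplit_ne_nil cs)]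

theorem pvDropLE_cons (x : List Char) (l : List (List Char)) (h : l ≠ []) :
    pvDropLE (x :: l) = x :: pvDropLE l := by
  obtain ⟨a, ha⟩ : ∃ a, l.getLast? = some a := by
    cases hl : l.getLast? with
    | none => exact absurd (List.getLast?_eq_none_iff.mp hl) h
    | some a => exact ⟨a, rfl⟩
  have h1 : (x :: l).getLast! = l.getLast! := by simp [List.getLast?_cons, ha]
  have h2 : (x :: l).dropLast = x :: l.dropLast := List.dropLast_cons_of_ne_nil h
  simp only [pvDropLE, h1, h2]
  split_ifs with h3 h4 h4 <;> simp_all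

-- A's scan equals the reference segmenter: the in_quote flag is the parity of quotes in buf
theorem pvGoA_eq (cs buf : List Char) (inq : Bool) (parts : List (List Char))
    (h : inq = (buf.count '\'' % 2 = 1 : Bool)) :
    pvGoA cs buf inq parts = parts ++ (pvDropLE (pvMid cs buf)).map PySem.Chars.strip := by
  revert h
  induction cs, buf, inq, parts using pvGoA.induct with
  | case1 buf inq parts hbuf =>
    intro h
    simp [pvGoA, pvMid, pvDropLE, hbuf]
  | case2 buf inq parts hbuf =>
    intro h
    have : buf = [] := by simpa using hbuf
    subst this
    simp [pvGoA, pvMid, pvDropLE]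
  | case3 buf inq parts c2 rest2 hcond ih =>
    intro h
    have hi : inq = true := (Bool.and_eq_true _ _ ▸ hcond).1
    have hc2 : c2 = '\'' := eq_of_beq (Bool.and_eq_true _ _ ▸ hcond).2
    subst hc2
    subst hi
    rw [show pvGoA ('\'' :: '\'' :: rest2) buf true parts
          = pvGoA rest2 (buf ++ ['\'', '\'']) true parts by
        rw [pvGoA.eq_def]; simp]
    rw [ih (by simp [h, List.count_append])]
    have : pvMid ('\'' :: '\'' :: rest2) buf = pvMid rest2 (buf ++ ['\'', '\'']) := by
      simp [pvMid]
    rw [this]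
  | case4 buf inq parts c2 rest2 hcond ih =>
    intro h
    rw [show pvGoA ('\'' :: c2 :: rest2) buf inq parts
          = pvGoA (c2 :: rest2) (buf ++ ['\'']) (!inq) parts by
        rw [pvGoA.eq_def]; simp [hcond]]
    rw [ih ?hpar]
    case hpar =>
      rcases Nat.mod_two_eq_zero_or_one (buf.count '\'') with h2 | h2 <;>
        simp [h, h2, List.count_append, Nat.add_mod]
    have : pvMid ('\'' :: c2 :: rest2) buf = pvMid (c2 :: rest2) (buf ++ ['\'']) := by
      simp [pvMid]
    rw [this]
  | case5 buf inq parts ih =>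
    intro h
    rw [show pvGoA ['\''] buf inq parts = pvGoA [] (buf ++ ['\'']) (!inq) parts by
        rw [pvGoA.eq_def]; simp]
    rw [ih ?hpar]
    case hpar =>
      rcases Nat.mod_two_eq_zero_or_one (buf.count '\'') with h2 | h2 <;>
        simp [h, h2, List.count_append, Nat.add_mod]
    have : pvMid ['\''] buf = pvMid [] (buf ++ ['\'']) := by simp [pvMid]
    rw [this]
  | case6 c rest buf inq parts hq hcomma ih =>
    intro h
    obtain ⟨hc, hi⟩ := hcomma
    subst hc
    have hpar : (buf.count '\'') % 2 = 0 := by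
      rcases Nat.mod_two_eq_zero_or_one (buf.count '\'') with h2 | h2
      · exact h2
      · rw [hi] at h; simp [h2] at h
    subst hi
    rw [show pvGoA (',' :: rest) buf false parts
          = pvGoA rest [] false (parts ++ [PySem.Chars.strip buf]) by
        rw [pvGoA.eq_def]; simp]
    rw [ih (by simp)]
    have : pvMid (',' :: rest) buf = buf :: pvMid rest [] := by simp [pvMid, hpar]
    rw [this, pvDropLE_cons _ _ (pvMid_ne_nil _ _)]
    simp
  | case7 c rest buf inq parts hq hcomma ih =>
    intro h
    rw [show pvGoA (c :: rest) buf inq parts = pvGoA rest (buf ++ [c]) inq parts by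
        rw [pvGoA.eq_def]; simp [hq, hcomma]]
    rw [ih (by simp [h, List.count_append, hq])]
    have : pvMid (c :: rest) buf = pvMid rest (buf ++ [c]) := by
      by_cases hc : c = ','
      · subst hc
        have : ¬ inq = false := fun hif => hcomma ⟨rfl, hif⟩
        have hi : inq = true := by cases inq <;> simp_all
        have hpar : (buf.count '\'') % 2 = 1 := by
          rw [hi] at h
          rcases Nat.mod_two_eq_zero_or_one (buf.count '\'') with h2 | h2
          · simp [h2] at h
          · exact h2
        simp [pvMid, hpar]
      · simp [pvMid, hc]
    rw [this]

-- pvGoB with a pending odd piece behaves as pvGoB with the comma re-joined in front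
theorem pvGoB_merge (p : List Char) (t : List (List Char)) (cur : List Char) (segs : List (List Char)) :
    pvGoB (p :: t) (some cur) segs = pvGoB ((cur ++ [','] ++ p) :: t) none segs := rfl

-- B's merge loop over the split pieces equals the reference segmenter
theorem pvGoB_eq (cs : List Char) : ∀ (pre : List Char) (segs : List (List Char)),
    pvGoB (pvConsFirst pre (pvSplit cs)) none segs = segs ++ pvMid cs pre := by
  induction cs with
  | nil =>
    intro pre segs
    simp only [pvSplit, pvConsFirst, List.append_nil, pvMid]
    simp only [pvGoB]
    split <;> rfl
  | cons c r ih =>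
    intro pre segs
    by_cases hc : c = ','
    · subst hc
      have hsr := pvSplit_ne_nil r
      have hsplit : pvSplit (',' :: r) = [] :: pvSplit r := by simp [pvSplit]
      have hcf : pvConsFirst pre ([] :: pvSplit r) = pre :: pvSplit r := by simp [pvConsFirst]
      rw [hsplit, hcf]
      rw [show pvGoB (pre :: pvSplit r) none segs
            = if PySem.Chars.count pre ['\''] % 2 = 0 then pvGoB (pvSplit r) none (segs ++ [pre])
              else pvGoB (pvSplit r) (some pre) segs from rfl]
      rw [pvCount_singleton]
      by_cases hp : pre.count '\'' % 2 = 0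
      · rw [if_pos hp]
        have : pvSplit r = pvConsFirst [] (pvSplit r) := (pvConsFirst_nil_of_ne _ hsr).symm
        rw [this, ih [] (segs ++ [pre])]
        simp [pvMid, hp]
      · rw [if_neg hp]
        obtain ⟨h0, t0, hht⟩ : ∃ h0 t0, pvSplit r = h0 :: t0 := by
          cases hq : pvSplit r with
          | nil => exact absurd hq hsr
          | cons h0 t0 => exact ⟨h0, t0, rfl⟩
        rw [hht, pvGoB_merge]
        have : (pre ++ [','] ++ h0) :: t0 = pvConsFirst (pre ++ [',']) (pvSplit r) := by
          rw [hht]; simp [pvConsFirst]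
        rw [this, ih (pre ++ [',']) segs]
        simp [pvMid, hp]
    · simp only [pvSplit, if_neg hc, pvConsFirst_consFirst]
      rw [ih (pre ++ [c]) segs]
      simp [pvMid, hc]

-- ===== VERDICT (by name: the statement is the Claim_ definition above) =====
theorem split_values_py_spec : Claim_equal_split_values_py := by
  intro s _
  unfold Spec_split_values_py split_values_py
  have halt : split_values_py_alt s
      = (pvDropLE (pvMid s.toList [])).map (fun cs => String.ofList (PySem.Chars.strip cs)) := by
    simp only [split_values_py_alt]
    rw [pvSplitOn_comma, ← pvConsFirst_nil_of_ne _ (pvSplit_ne_nil s.toList), pvGoB_eq s.toList [] []]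
    simp only [List.nil_append]
    rfl
  rw [halt, pvGoA_eq s.toList [] false [] (by simp)]
  simp [List.map_map, Function.comp]
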